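-- pv_equiv track=rewrite | github.com/neevliberman/SpectralAssembly | assembly.py | minus_one
-- ===== SOURCE A (Python) =====
-- def minus_one(kmer_counts):
--     """Returns a list of k_minus_one_mers, given a dictionary of kmer counts."""
--
--     k_minus_one_mers = []
--     for kmer in list(kmer_counts):
--         if kmer[:-1] not in k_minus_one_mers:
--             k_minus_one_mers.append(kmer[:-1])
--         if kmer[1:] not in k_minus_one_mers:
--             k_minus_one_mers.append(kmer[1:])
--
--     return k_minus_one_mers
-- ===== SOURCE B (Python) =====
-- def minus_one(kmer_counts):
--     """Returns a list of k_minus_one_mers, given a dictionary of kmer counts."""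
--     mers = [m for kmer in kmer_counts for m in (kmer[:-1], kmer[1:])]
--     k_minus_one_mers = []
--     while mers:
--         head = mers[0]
--         k_minus_one_mers.append(head)
--         mers = [m for m in mers[1:] if m != head]
--     return k_minus_one_mers
-- ===== Notes on version B (the rewrite author's own statement) =====
-- stated objective: alternative
-- what changed: B first flattens all prefix/suffix mers into one list, then deduplicates by repeatedly taking the head and filtering every later occurrence out of the REMAINING INPUT (nub-by-filtering), instead of A's single pass that tests each candidate for membership in the ACCUMULATED OUTPUT before appending.
import Mathlib
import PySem

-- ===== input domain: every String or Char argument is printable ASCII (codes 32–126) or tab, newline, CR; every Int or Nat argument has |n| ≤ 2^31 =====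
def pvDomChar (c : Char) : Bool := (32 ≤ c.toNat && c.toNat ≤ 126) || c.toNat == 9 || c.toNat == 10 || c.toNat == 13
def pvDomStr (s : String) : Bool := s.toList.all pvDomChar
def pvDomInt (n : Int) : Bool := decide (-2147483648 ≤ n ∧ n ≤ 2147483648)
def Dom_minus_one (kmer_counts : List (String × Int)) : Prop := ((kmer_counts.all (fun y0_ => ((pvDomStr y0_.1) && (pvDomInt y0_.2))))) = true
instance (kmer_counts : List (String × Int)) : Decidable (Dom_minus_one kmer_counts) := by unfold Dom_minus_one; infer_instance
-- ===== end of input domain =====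

-- B flattens all prefix/suffix mers first, then deduplicates by repeatedly taking the head
-- and filtering its later occurrences out of the remaining input (nub-by-filtering), instead
-- of A's membership test against the accumulated output; alternative decomposition, not faster.

-- ===== PORT A =====
def minus_one (kmer_counts : List (String × Int)) : List String :=
  (kmer_counts.map Prod.fst).foldl (fun k_minus_one_mers kmer =>
    let k_minus_one_mers :=
      if PySem.Str.slice kmer none (some (-1)) ∈ k_minus_one_mers then k_minus_one_mers
      else k_minus_one_mers ++ [PySem.Str.slice kmer none (some (-1))]
    if PySem.Str.slice kmer (some 1) none ∈ k_minus_one_mers then k_minus_one_mers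
    else k_minus_one_mers ++ [PySem.Str.slice kmer (some 1) none]) []

-- ===== PORT B =====
-- the while loop of Source B: take the head, append it, filter it out of the rest
def pvNub (mers : List String) : List String :=
  match mers with
  | [] => []
  | head :: rest => head :: pvNub (rest.filter (fun m => m != head))
termination_by mers.length
decreasing_by
  simp only [List.length_unattach]
  exact Nat.lt_succ_of_le (le_trans (List.length_filter_le _ _) (by simp))

def minus_one_alt (kmer_counts : List (String × Int)) : List String :=
  pvNub ((kmer_counts.map Prod.fst).flatMap (fun kmer =>
    [PySem.Str.slice kmer none (some (-1)), PySem.Str.slice kmer (some 1) none]))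

-- ===== PRECONDITION & SPEC =====
def Spec_minus_one (kmer_counts : List (String × Int)) (out : List String) : Prop := out = minus_one_alt kmer_counts
instance (kmer_counts : List (String × Int)) (out : List String) : Decidable (Spec_minus_one kmer_counts out) := by unfold Spec_minus_one; infer_instance

-- ===== CLAIM =====
def Claim_equal_minus_one : Prop := ∀ (kmer_counts : List (String × Int)), Dom_minus_one kmer_counts → Spec_minus_one kmer_counts (minus_one kmer_counts)

-- ===== LEMMAS AND PROOFS =====

-- A's per-kmer body is two PySem.Set.add steps over the flattened mer stream.
theorem minus_one_foldl_eq (keys : List String) (acc : List String) :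
    keys.foldl (fun k_minus_one_mers kmer =>
      let k_minus_one_mers :=
        if PySem.Str.slice kmer none (some (-1)) ∈ k_minus_one_mers then k_minus_one_mers
        else k_minus_one_mers ++ [PySem.Str.slice kmer none (some (-1))]
      if PySem.Str.slice kmer (some 1) none ∈ k_minus_one_mers then k_minus_one_mers
      else k_minus_one_mers ++ [PySem.Str.slice kmer (some 1) none]) acc
    = (keys.flatMap (fun kmer =>
        [PySem.Str.slice kmer none (some (-1)), PySem.Str.slice kmer (some 1) none])).foldl
        PySem.Set.add acc := by
  induction keys generalizing acc with
  | nil => rfl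
  | cons k ks ih =>
      simp only [List.foldl_cons, List.flatMap_cons, List.foldl_append, ih,
        PySem.Set.add_eq_ite, List.foldl_cons, List.foldl_nil]

-- seen-set dedup (foldl Set.add) equals nub-by-filtering, relative to any seen accumulator
theorem foldl_add_eq_nub (xs : List String) (acc : List String) :
    xs.foldl PySem.Set.add acc = acc ++ pvNub (xs.filter (fun m => m ∉ acc)) := by
  induction xs generalizing acc with
  | nil => simp [pvNub]
  | cons x xs ih =>
      simp only [List.foldl_cons, List.filter_cons]
      by_cases hx : x ∈ acc
      · have hadd : PySem.Set.add acc x = acc := by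
          simp [hx]
        rw [hadd, ih, if_neg (by simp [hx])]
      · have hadd : PySem.Set.add acc x = acc ++ [x] := by
          simp [hx]
        rw [hadd, ih, if_pos (by simp [hx])]
        rw [show ∀ h t, pvNub (h :: t) = h :: pvNub (t.filter (fun m => m != h)) from fun _ _ => by rw [pvNub]]
        have hfe : (xs.filter (fun m => decide (m ∉ acc))).filter (fun m => m != x)
            = xs.filter (fun m => decide (m ∉ acc ++ [x])) := by
          rw [List.filter_filter]
          apply List.filter_congr
          intro m _
          by_cases hm : m = x <;> by_cases hma : m ∈ acc <;> simp [hm, hma]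
        rw [hfe]
        simp

-- ===== VERDICT =====
theorem minus_one_spec : Claim_equal_minus_one := by
  intro kc _
  unfold Spec_minus_one minus_one minus_one_alt
  rw [minus_one_foldl_eq, foldl_add_eq_nub]
  simp
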